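-- pv_equiv track=rewrite | github.com/ChouDan6/XXMITools-CHN | migoto/mod_merge_uv.py | calculate_packing
-- ===== SOURCE A (Python) =====
-- import math
--
-- def get_pot(x):
--     return 2 ** math.ceil(math.log2(max(1, x)))
--
-- def get_even(x):
--     x = int(math.ceil(x))
--     return x if x % 2 == 0 else x + 1
--
-- def calculate_packing(images_info, target_w, mode):
--     sorted_images = sorted(images_info, key=lambda x: x[2], reverse=True)
--     max_img_w = max((img[1] for img in sorted_images), default=0)
--     actual_w = max(target_w, max_img_w)
--
--     if mode == 'POT': actual_w = get_pot(actual_w)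
--     else: actual_w = get_even(actual_w)
--
--     placements = {}
--     current_x, current_y = 0, 0
--     row_height = 0
--     max_y = 0
--
--     for img_hash, w, h in sorted_images:
--         if current_x + w > actual_w and current_x > 0:
--             current_y += row_height
--             current_x = 0
--             row_height = 0
--
--         placements[img_hash] = (current_x, current_y)
--         current_x += w
--         row_height = max(row_height, h)
--         max_y = max(max_y, current_y + h)
--
--     final_h = max_y
--     if mode == 'POT': final_h = get_pot(final_h)
--     else: final_h = get_even(final_h)
--
--     return actual_w, final_h, placements
-- ===== SOURCE B (Python) =====
-- import math
--
-- def get_pot(x):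
--     return 2 ** math.ceil(math.log2(max(1, x)))
--
-- def get_even(x):
--     x = int(math.ceil(x))
--     return x if x % 2 == 0 else x + 1
--
-- def calculate_packing(images_info, target_w, mode):
--     imgs = sorted(images_info, key=lambda x: x[2], reverse=True)
--     actual_w = max(target_w, max((img[1] for img in imgs), default=0))
--     actual_w = get_pot(actual_w) if mode == 'POT' else get_even(actual_w)
--
--     # Pass 1: slice the sorted list into shelf rows (two-pointer scan).
--     rows = []
--     i, n = 0, len(imgs)
--     while i < n:
--         j, x = i, 0
--         while j < n and not (x + imgs[j][1] > actual_w and x > 0):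
--             x += imgs[j][1]
--             j += 1
--         rows.append(imgs[i:j])
--         i = j
--
--     # Pass 2: lay rows out top to bottom.
--     placements = {}
--     y, best = 0, 0
--     for row in rows:
--         x = 0
--         for name, w, h in row:
--             placements[name] = (x, y)
--             x += w
--         top = max(h for _, _, h in row)
--         best = max(best, y + top)
--         y += max(0, top)
--
--     final_h = get_pot(best) if mode == 'POT' else get_even(best)
--     return actual_w, final_h, placements
-- ===== Notes on version B (the rewrite author's own statement) =====
-- stated objective: alternative
-- what changed: A packs in one fold over the sorted images with five running accumulators and an inline row-break; B first slices the sorted list into shelf rows with a two-pointer scan and then lays the rows out top-to-bottom in a second pass, computing the height as the max over rows of row_y + row's max image height.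
import Mathlib
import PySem

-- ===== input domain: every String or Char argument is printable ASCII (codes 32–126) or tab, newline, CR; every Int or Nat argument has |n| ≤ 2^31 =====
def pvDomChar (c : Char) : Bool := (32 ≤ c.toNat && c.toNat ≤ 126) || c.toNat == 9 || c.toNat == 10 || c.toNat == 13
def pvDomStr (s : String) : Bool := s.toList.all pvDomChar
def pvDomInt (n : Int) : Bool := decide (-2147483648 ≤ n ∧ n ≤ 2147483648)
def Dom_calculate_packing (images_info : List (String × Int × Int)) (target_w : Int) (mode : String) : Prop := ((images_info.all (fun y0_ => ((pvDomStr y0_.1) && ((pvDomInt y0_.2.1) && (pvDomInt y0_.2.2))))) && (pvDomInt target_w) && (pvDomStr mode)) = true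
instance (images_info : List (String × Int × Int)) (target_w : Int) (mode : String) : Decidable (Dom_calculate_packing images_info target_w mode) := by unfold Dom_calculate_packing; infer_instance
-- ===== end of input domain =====

-- B replaces A's single fold (five running accumulators with an inline row-break) by two passes:
-- split the sorted list into shelf rows, then lay the rows out; same return value (objective: alternative decomposition).

-- ===== PORT A =====
-- ceil(log2 x) for x ≥ 1, as an integer (exact for the 2 ** math.ceil(math.log2(..)) in get_pot)
def pvClog2 (x : Int) : Nat :=
  if h : x ≤ 1 then 0
  else 1 + pvClog2 (PySem.Int.floordiv (x + 1) 2)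
termination_by x.toNat
decreasing_by
  rw [PySem.Int.floordiv_eq_ediv_of_pos (by omega)]
  omega

def get_pot (x : Int) : Int := 2 ^ pvClog2 (max 1 x)

def get_even (x : Int) : Int := if PySem.Int.mod x 2 = 0 then x else x + 1

-- A's single loop: state (placements, current_x, current_y, row_height, max_y)
def packLoopA (aw : Int) :
    List (String × Int × Int) → PySem.Dict String (Int × Int) → Int → Int → Int → Int →
    (PySem.Dict String (Int × Int)) × Int
  | [], d, _cx, _cy, _rh, my => (d, my)
  | (name, w, h) :: rest, d, cx, cy, rh, my =>
    let s := if cx + w > aw ∧ cx > 0 then (0, cy + rh, 0) else (cx, cy, rh)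
    packLoopA aw rest (d.insert name (s.1, s.2.1)) (s.1 + w) s.2.1 (max s.2.2 h)
      (max my (s.2.1 + h))

def calculate_packing (images_info : List (String × Int × Int)) (target_w : Int) (mode : String) : Int × Int × (List (String × Int × Int)) :=
  let sorted_images := PySem.List.sorted images_info (fun x => x.2.2) true
  let max_img_w := PySem.List.maxD (sorted_images.map (fun img => img.2.1)) (fun x => x) 0
  let actual_w0 := max target_w max_img_w
  let actual_w := if mode = "POT" then get_pot actual_w0 else get_even actual_w0
  let r := packLoopA actual_w sorted_images PySem.Dict.empty 0 0 0 0
  let final_h := if mode = "POT" then get_pot r.2 else get_even r.2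
  (actual_w, final_h, r.1.items)

-- ===== PORT B =====
-- inner while of pass 1: take the current row (and return the rest), given the running x
def rowSplit (aw : Int) : List (String × Int × Int) → Int →
    (List (String × Int × Int)) × (List (String × Int × Int))
  | [], _x => ([], [])
  | it :: rest, x =>
    if x + it.2.1 > aw ∧ x > 0 then ([], it :: rest)
    else
      let p := rowSplit aw rest (x + it.2.1)
      (it :: p.1, p.2)

theorem rowSplit_snd_length_le (aw : Int) (l : List (String × Int × Int)) (x : Int) :
    (rowSplit aw l x).2.length ≤ l.length := by
  induction l generalizing x with
  | nil => simp [rowSplit]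
  | cons it rest ih =>
    simp only [rowSplit]
    split
    · simp
    · exact le_trans (ih _) (Nat.le_succ _)

-- pass 1: the list of shelf rows
def rowsOf (aw : Int) : List (String × Int × Int) → List (List (String × Int × Int))
  | [] => []
  | it :: rest =>
    let p := rowSplit aw (it :: rest) 0
    p.1 :: rowsOf aw p.2
termination_by l => l.length
decreasing_by
  have h := rowSplit_snd_length_le aw rest (0 + it.2.1)
  simp only [rowSplit]
  split
  · next hcond => exact absurd hcond.2 (lt_irrefl 0)
  · simpa using Nat.lt_succ_of_le h

-- place one row left to right at height y
def placeRow : List (String × Int × Int) → PySem.Dict String (Int × Int) → Int → Int →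
    PySem.Dict String (Int × Int)
  | [], d, _x, _y => d
  | (name, w, _h) :: t, d, x, y => placeRow t (d.insert name (x, y)) (x + w) y

-- max(h for _, _, h in row)  (rows are nonempty by construction)
def rowTop : List (String × Int × Int) → Int
  | [] => 0
  | (_, _, h) :: t => t.foldl (fun m it => max m it.2.2) h

-- pass 2: lay rows out top to bottom, tracking y and the best bottom edge
def layoutRows : List (List (String × Int × Int)) → PySem.Dict String (Int × Int) → Int → Int →
    (PySem.Dict String (Int × Int)) × Int
  | [], d, _y, best => (d, best)
  | row :: rs, d, y, best =>
    let d' := placeRow row d 0 y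
    let top := rowTop row
    layoutRows rs d' (y + max 0 top) (max best (y + top))

def calculate_packing_alt (images_info : List (String × Int × Int)) (target_w : Int) (mode : String) : Int × Int × (List (String × Int × Int)) :=
  let imgs := PySem.List.sorted images_info (fun x => x.2.2) true
  let actual_w0 := max target_w (PySem.List.maxD (imgs.map (fun img => img.2.1)) (fun x => x) 0)
  let actual_w := if mode = "POT" then get_pot actual_w0 else get_even actual_w0
  let r := layoutRows (rowsOf actual_w imgs) PySem.Dict.empty 0 0
  let final_h := if mode = "POT" then get_pot r.2 else get_even r.2
  (actual_w, final_h, r.1.items)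

-- ===== PRECONDITION & SPEC =====
def Spec_calculate_packing (images_info : List (String × Int × Int)) (target_w : Int) (mode : String) (out : Int × Int × (List (String × Int × Int))) : Prop := out = calculate_packing_alt images_info target_w mode
instance (images_info : List (String × Int × Int)) (target_w : Int) (mode : String) (out : Int × Int × (List (String × Int × Int))) : Decidable (Spec_calculate_packing images_info target_w mode out) := by unfold Spec_calculate_packing; infer_instance

-- ===== CLAIM (what is proved, stated in full; the proofs are below) =====
def Claim_equal_calculate_packing : Prop := ∀ (images_info : List (String × Int × Int)) (target_w : Int) (mode : String), Dom_calculate_packing images_info target_w mode → Spec_calculate_packing images_info target_w mode (calculate_packing images_info target_w mode)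

-- ===== LEMMAS AND PROOFS =====

-- fold of max with a split initial value
theorem foldl_max_split (f : (String × Int × Int) → Int) (t : List (String × Int × Int))
    (a b : Int) :
    t.foldl (fun m it => max m (f it)) (max a b) =
      max a (t.foldl (fun m it => max m (f it)) b) := by
  induction t generalizing b with
  | nil => rfl
  | cons x xs ih =>
    simp only [List.foldl_cons, max_assoc]
    exact ih (max b (f x))

theorem foldl_max_add (cy : Int) (t : List (String × Int × Int)) (b : Int) :
    t.foldl (fun m it => max m (cy + it.2.2)) (cy + b) =
      cy + t.foldl (fun m it => max m it.2.2) b := by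
  induction t generalizing b with
  | nil => rfl
  | cons x xs ih =>
    simp only [List.foldl_cons]
    rw [max_add_add_left]
    exact ih (max b x.2.2)

-- A's loop, viewed one row at a time
theorem packLoopA_row (aw : Int) (l : List (String × Int × Int)) :
    ∀ (x : Int) (d : PySem.Dict String (Int × Int)) (cy rh my : Int),
    packLoopA aw l d x cy rh my =
      (let p := rowSplit aw l x
       let d' := placeRow p.1 d x cy
       let rh' := p.1.foldl (fun m it => max m it.2.2) rh
       let my' := p.1.foldl (fun m it => max m (cy + it.2.2)) my
       if p.2 = [] then (d', my') else packLoopA aw p.2 d' 0 (cy + rh') 0 my') := by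
  induction l with
  | nil => intro x d cy rh my; simp [packLoopA, rowSplit, placeRow]
  | cons it rest ih =>
    intro x d cy rh my
    obtain ⟨name, w, h⟩ := it
    by_cases hb : x + w > aw ∧ x > 0
    · -- row break: the split row is empty, A continues with a fresh row
      rw [show rowSplit aw ((name, w, h) :: rest) x = ([], (name, w, h) :: rest) from by
        simp [rowSplit, hb]]
      have hne : (name, w, h) :: rest ≠ ([] : List (String × Int × Int)) := by simp
      simp only [placeRow, List.foldl_nil, if_neg hne]
      -- unfold one step of each side
      simp [packLoopA, hb]
    · simp only [rowSplit, if_neg hb]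
      show packLoopA aw ((name, w, h) :: rest) d x cy rh my = _
      simp only [packLoopA, if_neg hb]
      rw [ih (x + w) (d.insert name (x, cy)) cy (max rh h) (max my (cy + h))]
      simp [placeRow]

-- the bridge: A's loop from a fresh row state equals B's two-pass layout
theorem packLoopA_eq_layout (aw : Int) :
    ∀ (n : Nat) (l : List (String × Int × Int)), l.length ≤ n →
    ∀ (d : PySem.Dict String (Int × Int)) (cy my : Int),
    packLoopA aw l d 0 cy 0 my = layoutRows (rowsOf aw l) d cy my := by
  intro n
  induction n with
  | zero =>
    intro l hl d cy my
    have : l = [] := List.eq_nil_of_length_eq_zero (Nat.le_zero.mp hl)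
    subst this; simp [packLoopA, rowsOf, layoutRows]
  | succ n ih =>
    intro l hl d cy my
    match l with
    | [] => simp [packLoopA, rowsOf, layoutRows]
    | it :: rest =>
      rw [packLoopA_row]
      simp only [rowsOf]
      have hsp : rowSplit aw (it :: rest) 0 =
          (it :: (rowSplit aw rest it.2.1).1, (rowSplit aw rest it.2.1).2) := by
        obtain ⟨name, w, h⟩ := it
        simp [rowSplit]
      rw [hsp]
      simp only [layoutRows]
      obtain ⟨name, w, h⟩ := it
      set p := rowSplit aw rest (name, w, h).2.1 with hp
      -- the three per-row quantities agree
      have htop : ∀ b : Int,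
          ((name, w, h) :: p.1).foldl (fun m it => max m it.2.2) b =
            max b (rowTop ((name, w, h) :: p.1)) := by
        intro b
        simp only [List.foldl_cons, rowTop]
        have := foldl_max_split (fun it => it.2.2) p.1 b h
        simpa [max_comm] using this
      have hmy :
          ((name, w, h) :: p.1).foldl (fun m it => max m (cy + it.2.2)) my =
            max my (cy + rowTop ((name, w, h) :: p.1)) := by
        simp only [List.foldl_cons, rowTop]
        have h1 := foldl_max_split (fun it => cy + it.2.2) p.1 my (cy + h)
        have h2 := foldl_max_add cy p.1 h
        rw [show max my (cy + h) = max my (cy + h) from rfl] at h1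
        calc p.1.foldl (fun m it => max m (cy + it.2.2)) (max my (cy + h))
            = max my (p.1.foldl (fun m it => max m (cy + it.2.2)) (cy + h)) := h1
          _ = max my (cy + p.1.foldl (fun m it => max m it.2.2) h) := by rw [h2]
      by_cases hnil : p.2 = []
      · simp only [hnil, hmy]
        simp [rowsOf, layoutRows]
      · simp only [if_neg hnil]
        have hlen : p.2.length ≤ n := by
          have h2 := rowSplit_snd_length_le aw rest (name, w, h).2.1
          rw [← hp] at h2
          simp only [List.length_cons] at hl
          omega
        rw [ih p.2 hlen, hmy, htop 0]

theorem calculate_packing_spec : Claim_equal_calculate_packing := by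
  intro images_info target_w mode _
  unfold Spec_calculate_packing calculate_packing calculate_packing_alt
  simp only []
  rw [packLoopA_eq_layout _ _ _ le_rfl]
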